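-- pv_equiv track=rewrite | github.com/mat2ja/napredni-python | zadace/dz2/dz.py | has_no_intersections
-- ===== SOURCE A (Python) =====
-- def toMinutes(interval):
--     sati, minute = interval
--     return sati * 60 + minute
--
-- def convertToRange(interval):
--     return range(toMinutes(interval[1]), toMinutes(interval[2]))
--
-- def has_no_intersections(kombinacija):
--     L = len(kombinacija)
--     for i in range(0, L):
--         nrange = convertToRange(kombinacija[i])
--         for j in range(i+1, L):
--             mrange = convertToRange(kombinacija[j])
--             if (set(nrange).intersection(mrange)):
--                 return False
--     return True
-- ===== SOURCE B (Python) =====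
-- def toMinutes(interval):
--     sati, minute = interval
--     return sati * 60 + minute
--
-- def has_no_intersections(kombinacija):
--     # keep only non-empty intervals (an empty interval intersects nothing),
--     # sort by start, then non-intersection == every adjacent pair is disjoint
--     ivs = [(toMinutes(a), toMinutes(b)) for _, a, b in kombinacija]
--     ivs = [iv for iv in ivs if iv[0] < iv[1]]
--     ivs.sort(key=lambda iv: iv[0])
--     return all(ivs[i][1] <= ivs[i + 1][0] for i in range(len(ivs) - 1))
-- ===== Notes on version B (the rewrite author's own statement) =====
-- stated objective: faster
-- what changed: Replaces the quadratic all-pairs test that materialises each interval as a set of minute values with: drop empty intervals, sort by start, and check only adjacent pairs for overlap.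
import Mathlib
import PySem

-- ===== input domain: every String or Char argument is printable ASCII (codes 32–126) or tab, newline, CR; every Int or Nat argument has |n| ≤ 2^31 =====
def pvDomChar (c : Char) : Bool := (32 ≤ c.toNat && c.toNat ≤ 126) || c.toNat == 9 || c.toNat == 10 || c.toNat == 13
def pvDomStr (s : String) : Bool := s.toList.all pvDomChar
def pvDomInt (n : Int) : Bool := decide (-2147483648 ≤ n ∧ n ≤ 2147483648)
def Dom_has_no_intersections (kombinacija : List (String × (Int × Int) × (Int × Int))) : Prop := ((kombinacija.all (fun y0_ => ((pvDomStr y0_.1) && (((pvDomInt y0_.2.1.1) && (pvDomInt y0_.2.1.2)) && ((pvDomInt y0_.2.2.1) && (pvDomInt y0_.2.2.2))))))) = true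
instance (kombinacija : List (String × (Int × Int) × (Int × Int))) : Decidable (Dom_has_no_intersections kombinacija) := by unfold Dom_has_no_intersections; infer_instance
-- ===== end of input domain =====

-- B replaces A's quadratic all-pairs set-of-minutes intersection test by
-- "drop empty intervals, sort by start, check adjacent pairs" (asymptotically faster).

-- ===== PORT A =====
def toMinutesA (interval : Int × Int) : Int := interval.1 * 60 + interval.2

def convertToRangeA (x : String × (Int × Int) × (Int × Int)) : List Int :=
  PySem.List.pyRange (toMinutesA x.2.1) (toMinutesA x.2.2) 1

-- "set(nrange).intersection(mrange)" truthiness, ported by hand (PySem.Set is list-backed and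
-- cannot be evaluated on ranges of ~10^5 minutes): CPython builds a HASH set from nrange and then
-- iterates mrange testing membership; exact — same elements, nonempty iff some z of mrange is in set(nrange)
def aCheck (nrange mrange : List Int) : Bool :=
  let s := Std.HashSet.ofList nrange
  mrange.any (fun z => s.contains z)

-- inner loop "for j in range(i+1, L)": true = no intersection found (so the outer loop continues)
def aInnerLoop (nrange : List Int) : List (String × (Int × Int) × (Int × Int)) → Bool
  | [] => true
  | y :: rest =>
    let mrange := convertToRangeA y
    if aCheck nrange mrange then false
    else aInnerLoop nrange rest

-- outer loop "for i in range(0, L)"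
def aOuterLoop : List (String × (Int × Int) × (Int × Int)) → Bool
  | [] => true
  | x :: rest =>
    let nrange := convertToRangeA x
    if aInnerLoop nrange rest then aOuterLoop rest else false

def has_no_intersections (kombinacija : List (String × (Int × Int) × (Int × Int))) : Bool :=
  aOuterLoop kombinacija

-- ===== PORT B =====
def toMinutesB (interval : Int × Int) : Int := interval.1 * 60 + interval.2

-- "all(ivs[i][1] <= ivs[i+1][0] for i in range(len(ivs)-1))": adjacent-pair check
def bAdjacent : List (Int × Int) → Bool
  | [] => true
  | [_] => true
  | p :: q :: rest => decide (p.2 ≤ q.1) && bAdjacent (q :: rest)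

def has_no_intersections_alt (kombinacija : List (String × (Int × Int) × (Int × Int))) : Bool :=
  let ivs := kombinacija.map (fun x => (toMinutesB x.2.1, toMinutesB x.2.2))
  let ivs := ivs.filter (fun iv => decide (iv.1 < iv.2))
  let ivs := PySem.List.sorted ivs Prod.fst
  bAdjacent ivs

-- ===== PRECONDITION & SPEC =====
def Spec_has_no_intersections (kombinacija : List (String × (Int × Int) × (Int × Int))) (out : Bool) : Prop := out = has_no_intersections_alt kombinacija
instance (kombinacija : List (String × (Int × Int) × (Int × Int))) (out : Bool) : Decidable (Spec_has_no_intersections kombinacija out) := by unfold Spec_has_no_intersections; infer_instance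

-- ===== CLAIM (what is proved, stated in full; the proofs are below) =====
def Claim_equal_has_no_intersections : Prop := ∀ (kombinacija : List (String × (Int × Int) × (Int × Int))), Dom_has_no_intersections kombinacija → Spec_has_no_intersections kombinacija (has_no_intersections kombinacija)

-- ===== LEMMAS AND PROOFS =====

-- the overlap relation both programs decide: the two minute intervals share a point
def pvOv (p q : Int × Int) : Prop := max p.1 q.1 < min p.2 q.2

def pvMM (x : String × (Int × Int) × (Int × Int)) : Int × Int :=
  (toMinutesA x.2.1, toMinutesA x.2.2)

theorem pvOv_symm : ∀ {p q : Int × Int}, pvOv p q → pvOv q p := by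
  intro p q h; unfold pvOv at *; omega

theorem pvNotOv_symm : ∀ {p q : Int × Int}, ¬ pvOv p q → ¬ pvOv q p :=
  fun h hq => h (pvOv_symm hq)

-- A's set-intersection truthiness test decides pvOv
theorem aCheck_iff (x y : String × (Int × Int) × (Int × Int)) :
    aCheck (convertToRangeA x) (convertToRangeA y) = true ↔ pvOv (pvMM x) (pvMM y) := by
  unfold aCheck
  simp only [List.any_eq_true, Std.HashSet.contains_ofList, List.contains_eq_mem,
    convertToRangeA, PySem.List.mem_pyRange_one, decide_eq_true_eq]
  constructor
  · rintro ⟨z, ⟨h1, h2⟩, h3, h4⟩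
    unfold pvOv pvMM; omega
  · intro hov
    refine ⟨max (toMinutesA x.2.1) (toMinutesA y.2.1), ?_, ?_⟩ <;>
      (unfold pvOv pvMM at hov; constructor <;> omega)

theorem aInnerLoop_iff (x : String × (Int × Int) × (Int × Int))
    (l : List (String × (Int × Int) × (Int × Int))) :
    aInnerLoop (convertToRangeA x) l = true ↔ ∀ y ∈ l, ¬ pvOv (pvMM x) (pvMM y) := by
  induction l with
  | nil => simp [aInnerLoop]
  | cons y rest ih =>
    simp only [aInnerLoop, List.mem_cons]
    by_cases h : aCheck (convertToRangeA x) (convertToRangeA y) = true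
    · rw [if_pos h]
      simp only [Bool.false_eq_true, false_iff]
      intro hall
      exact (hall y (Or.inl rfl)) ((aCheck_iff x y).mp h)
    · rw [if_neg h, ih]
      have hno : ¬ pvOv (pvMM x) (pvMM y) := fun hov => h ((aCheck_iff x y).mpr hov)
      constructor
      · rintro hall z (rfl | hz)
        · exact hno
        · exact hall z hz
      · intro hall z hz; exact hall z (Or.inr hz)

theorem aOuterLoop_iff (l : List (String × (Int × Int) × (Int × Int))) :
    aOuterLoop l = true ↔ (l.map pvMM).Pairwise (fun p q => ¬ pvOv p q) := by
  induction l with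
  | nil => simp [aOuterLoop]
  | cons x rest ih =>
    simp only [aOuterLoop, List.map_cons, List.pairwise_cons]
    by_cases h : aInnerLoop (convertToRangeA x) rest = true
    · rw [if_pos h, ih]
      have hx := (aInnerLoop_iff x rest).mp h
      constructor
      · intro hp
        refine ⟨?_, hp⟩
        intro q hq
        obtain ⟨y, hy, rfl⟩ := List.mem_map.mp hq
        exact hx y hy
      · exact fun hp => hp.2
    · rw [if_neg h]
      simp only [Bool.false_eq_true, false_iff]
      intro hp
      exact h ((aInnerLoop_iff x rest).mpr (fun y hy => hp.1 (pvMM y) (List.mem_map_of_mem hy)))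

-- dropping empty intervals does not change pairwise disjointness (an empty interval overlaps nothing)
theorem pvOv_of_empty {p q : Int × Int} (h : ¬ p.1 < p.2) : ¬ pvOv p q := by
  unfold pvOv; omega

theorem pairwise_filter_iff (l : List (Int × Int)) :
    l.Pairwise (fun p q => ¬ pvOv p q) ↔
      (l.filter (fun iv => decide (iv.1 < iv.2))).Pairwise (fun p q => ¬ pvOv p q) := by
  induction l with
  | nil => simp
  | cons p rest ih =>
    by_cases hp : p.1 < p.2
    · rw [List.filter_cons_of_pos (by simpa using hp)]
      simp only [List.pairwise_cons]
      rw [ih]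
      constructor
      · rintro ⟨h1, h2⟩
        exact ⟨fun q hq => h1 q (List.mem_of_mem_filter hq), h2⟩
      · rintro ⟨h1, h2⟩
        refine ⟨?_, h2⟩
        intro q hq
        by_cases hq2 : q.1 < q.2
        · exact h1 q (List.mem_filter.mpr ⟨hq, by simpa using hq2⟩)
        · exact fun hov => pvOv_of_empty hq2 (pvOv_symm hov)
    · rw [List.filter_cons_of_neg (by simpa using hp)]
      simp only [List.pairwise_cons]
      rw [ih]
      constructor
      · rintro ⟨_, h2⟩; exact h2
      · intro h2; exact ⟨fun q _ => pvOv_of_empty hp, h2⟩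

-- on a start-sorted list of non-empty intervals, the adjacent check decides pairwise disjointness
theorem bAdjacent_iff : ∀ (l : List (Int × Int)),
    l.Pairwise (fun p q => p.1 ≤ q.1) → (∀ p ∈ l, p.1 < p.2) →
    (bAdjacent l = true ↔ l.Pairwise (fun p q => ¬ pvOv p q))
  | [] => by simp [bAdjacent]
  | [p] => by simp [bAdjacent]
  | p :: q :: rest => by
    intro hs hne
    have hs' := (List.pairwise_cons.mp hs).2
    have hne' : ∀ r ∈ q :: rest, r.1 < r.2 := fun r hr => hne r (List.mem_cons_of_mem p hr)
    have ih := bAdjacent_iff (q :: rest) hs' hne'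
    simp only [bAdjacent, Bool.and_eq_true, decide_eq_true_eq, ih]
    constructor
    · rintro ⟨hpq, hrest⟩
      rw [List.pairwise_cons]
      refine ⟨?_, hrest⟩
      intro r hr
      have h1 : q.1 ≤ r.1 := by
        rcases List.mem_cons.mp hr with rfl | hr'
        · exact le_refl r.1
        · exact (List.pairwise_cons.mp hs').1 r hr'
      unfold pvOv; omega
    · intro hp
      have h1 := (List.pairwise_cons.mp hp).1 q (List.mem_cons_self ..)
      have h2 : p.1 ≤ q.1 := (List.pairwise_cons.mp hs).1 q (List.mem_cons_self ..)
      have h3 : q.1 < q.2 := hne' q (List.mem_cons_self ..)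
      refine ⟨?_, (List.pairwise_cons.mp hp).2⟩
      unfold pvOv at h1; omega

theorem alt_iff (k : List (String × (Int × Int) × (Int × Int))) :
    has_no_intersections_alt k = true ↔ (k.map pvMM).Pairwise (fun p q => ¬ pvOv p q) := by
  unfold has_no_intersections_alt
  have hmap : k.map (fun x => (toMinutesB x.2.1, toMinutesB x.2.2)) = k.map pvMM := rfl
  rw [hmap]
  set fl := (k.map pvMM).filter (fun iv => decide (iv.1 < iv.2)) with hfl
  have hperm : (PySem.List.sorted fl Prod.fst).Perm fl := PySem.List.sorted_perm fl Prod.fst false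
  have hsorted : (PySem.List.sorted fl Prod.fst).Pairwise (fun p q => p.1 ≤ q.1) :=
    PySem.List.sorted_pairwise fl Prod.fst
  have hne : ∀ p ∈ PySem.List.sorted fl Prod.fst, p.1 < p.2 := by
    intro p hp
    have := (PySem.List.mem_sorted fl Prod.fst false p).mp hp
    rw [hfl] at this
    simpa using (List.mem_filter.mp this).2
  rw [bAdjacent_iff _ hsorted hne]
  rw [hperm.pairwise_iff (fun {x y} => pvNotOv_symm)]
  rw [hfl, ← pairwise_filter_iff]

-- ===== VERDICT (by name: the statement is the Claim_ definition above) =====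
theorem has_no_intersections_spec : Claim_equal_has_no_intersections := by
  intro k _
  unfold Spec_has_no_intersections has_no_intersections
  have ha := aOuterLoop_iff k
  have hb := alt_iff k
  by_cases h : (k.map pvMM).Pairwise (fun p q => ¬ pvOv p q)
  · rw [ha.mpr h, hb.mpr h]
  · rw [Bool.eq_false_iff.mpr (fun hc => h (ha.mp hc)),
        Bool.eq_false_iff.mpr (fun hc => h (hb.mp hc))]
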